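-- pv_equiv track=rewrite | github.com/RCanDo/Python | Codility/task.py | solution
-- ===== SOURCE A (Python) =====
-- def solution(A):
--     """
--     For array A of integers in {1, ..., N} and of length N
--     find number M = minimal number 'moves', i.e.
--     of additions and/or subtractions of 1 from any of the number in A
--     so that after all these moves A is a permutation of (1, ..., N).
--     solution([1, 2, 1])  #-> [1, 2, 3] or [2, 3, 1],  M = 2
--     solution([2, 1, 4, 4])  #-> [2, 1, 4, 3] or [2, 1, 3, 4],  M = 1
--     solution([6, 2, 3, 5, 6, 3])  #-> [6, 2, 3, 5,  4, 1],  M = 4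
--     return -1 if M > 1e9
--     """
--     A = sorted(A)
--
--     moves = 0
--     for k in range(len(A)):
--         moves += abs(A[k] - (k + 1))
--
--     if moves > int(1e9):
--         moves = -1
--
--     return moves
-- ===== SOURCE B (Python) =====
-- def solution(A):
--     cnt = {}
--     for x in A:
--         cnt[x] = cnt.get(x, 0) + 1
--     moves = 0
--     pos = 0
--     for v in sorted(cnt):
--         c = cnt[v]
--         lo = pos + 1
--         hi = pos + c
--         if v <= lo:
--             moves += (lo + hi) * c // 2 - c * v
--         elif hi <= v:
--             moves += c * v - (lo + hi) * c // 2
--         else: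
--             moves += (v - lo) * (v - lo + 1) // 2 + (hi - v) * (hi - v + 1) // 2
--         pos = hi
--     return -1 if moves > 1000000000 else moves
-- ===== Notes on version B (the rewrite author's own statement) =====
-- stated objective: alternative
-- what changed: Instead of sorting all N elements and summing |sorted[k]-(k+1)| elementwise, B builds a value->count dictionary, walks the sorted DISTINCT values once and adds each run's cost in closed form (Gauss/triangle sums), so the cost is O(d log d) in the number d of distinct values.
import Mathlib
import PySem

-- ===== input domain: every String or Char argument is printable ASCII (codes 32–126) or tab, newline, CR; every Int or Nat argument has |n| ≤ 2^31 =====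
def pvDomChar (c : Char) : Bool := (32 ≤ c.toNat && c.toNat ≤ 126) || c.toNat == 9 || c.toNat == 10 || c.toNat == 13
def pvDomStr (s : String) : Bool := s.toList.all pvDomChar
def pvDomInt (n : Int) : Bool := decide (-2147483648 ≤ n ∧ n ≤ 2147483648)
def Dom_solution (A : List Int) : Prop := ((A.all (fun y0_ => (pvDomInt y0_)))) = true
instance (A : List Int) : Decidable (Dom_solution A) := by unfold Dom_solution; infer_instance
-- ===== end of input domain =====

-- B replaces A's sort-all-N-elements-then-sum loop by a value->count dictionary walked over the
-- sorted distinct values, adding each run's cost by a closed-form triangle sum (objective: alternative).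

-- ===== PORT A =====
def solution (A : List Int) : Int :=
  let As := PySem.List.sorted A (fun x => x) false
  let moves := (PySem.List.pyRange 0 (As.length : Int) 1).foldl
      (fun m k => m + |PySem.List.pyGetD As k 0 - (k + 1)|) 0
  if moves > 1000000000 then -1 else moves

-- ===== PORT B =====
def solution_alt (A : List Int) : Int :=
  let cnt := A.foldl (fun d x => d.insert x (d.getD x 0 + 1)) (PySem.Dict.empty : PySem.Dict Int Int)
  let res := (PySem.List.sorted cnt.keys (fun x => x) false).foldl
    (fun (q : Int × Int) v =>
      let c := cnt.getD v 0
      let lo := q.2 + 1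
      let hi := q.2 + c
      let add :=
        if v ≤ lo then PySem.Int.floordiv ((lo + hi) * c) 2 - c * v
        else if hi ≤ v then c * v - PySem.Int.floordiv ((lo + hi) * c) 2
        else PySem.Int.floordiv ((v - lo) * (v - lo + 1)) 2 +
             PySem.Int.floordiv ((hi - v) * (hi - v + 1)) 2
      (q.1 + add, hi)) (0, 0)
  if res.1 > 1000000000 then -1 else res.1

-- ===== PRECONDITION & SPEC =====
def Spec_solution (A : List Int) (out : Int) : Prop := out = solution_alt A
instance (A : List Int) (out : Int) : Decidable (Spec_solution A out) := by unfold Spec_solution; infer_instance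

-- ===== CLAIM (what is proved, stated in full; the proofs are below) =====
def Claim_equal_solution : Prop := ∀ (A : List Int), Dom_solution A → Spec_solution A (solution A)

-- ===== LEMMAS AND PROOFS =====

-- cost of placing the elements of s at positions p+1, p+2, …
def pvCost (s : List Int) (p : Int) : Int :=
  ((PySem.List.enumerate s p).map (fun q => |q.2 - (q.1 + 1)|)).sum

-- B's loop body, with the counter lookup replaced by List.count
def pvStep (A : List Int) (q : Int × Int) (v : Int) : Int × Int :=
  let c : Int := (A.count v : Int)
  let lo := q.2 + 1
  let hi := q.2 + c
  let add :=
    if v ≤ lo then PySem.Int.floordiv ((lo + hi) * c) 2 - c * v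
    else if hi ≤ v then c * v - PySem.Int.floordiv ((lo + hi) * c) 2
    else PySem.Int.floordiv ((v - lo) * (v - lo + 1)) 2 +
         PySem.Int.floordiv ((hi - v) * (hi - v + 1)) 2
  (q.1 + add, hi)

theorem pvStep_eq (A : List Int) :
    (fun (q : Int × Int) v =>
      let c := (PySem.Dict.counter A).getD v 0
      let lo := q.2 + 1
      let hi := q.2 + c
      let add :=
        if v ≤ lo then PySem.Int.floordiv ((lo + hi) * c) 2 - c * v
        else if hi ≤ v then c * v - PySem.Int.floordiv ((lo + hi) * c) 2
        else PySem.Int.floordiv ((v - lo) * (v - lo + 1)) 2 +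
             PySem.Int.floordiv ((hi - v) * (hi - v + 1)) 2
      (q.1 + add, hi)) = pvStep A := by
  funext q v
  simp only [pvStep, PySem.Dict.getD_counter]

theorem pvCost_nil (p : Int) : pvCost [] p = 0 := rfl

theorem pvCost_cons (x : Int) (t : List Int) (p : Int) :
    pvCost (x :: t) p = |x - (p + 1)| + pvCost t (p + 1) := by
  simp [pvCost, PySem.List.enumerate_cons]

theorem pvCost_append (xs ys : List Int) (p : Int) :
    pvCost (xs ++ ys) p = pvCost xs p + pvCost ys (p + xs.length) := by
  simp [pvCost, PySem.List.enumerate_append]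

-- floor division by 2 pulls an even summand out
theorem pvFd2_shift (k x : Int) : PySem.Int.floordiv (2 * k + x) 2 = k + PySem.Int.floordiv x 2 := by
  rw [PySem.Int.floordiv_eq_ediv_of_pos (by norm_num), PySem.Int.floordiv_eq_ediv_of_pos (by norm_num)]
  omega

theorem pvFd2_zero : PySem.Int.floordiv 0 2 = 0 := by
  rw [PySem.Int.floordiv_eq_ediv_of_pos (by norm_num)]; norm_num

-- triangle-number recurrence for B's closed forms
theorem pvTri_rec (n : Int) :
    PySem.Int.floordiv (n * (n + 1)) 2 = n + PySem.Int.floordiv ((n - 1) * n) 2 := by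
  have he : n * (n + 1) = 2 * n + (n - 1) * n := by ring
  rw [he, pvFd2_shift]

-- B's per-run closed form equals the elementwise cost of the run
theorem pvBlock (c : Nat) (v p : Int) :
    pvCost (List.replicate c v) p =
      (if v ≤ p + 1 then PySem.Int.floordiv ((p + 1 + (p + c)) * c) 2 - c * v
       else if p + c ≤ v then c * v - PySem.Int.floordiv ((p + 1 + (p + c)) * c) 2
       else PySem.Int.floordiv ((v - (p + 1)) * (v - (p + 1) + 1)) 2 +
            PySem.Int.floordiv ((p + c - v) * (p + c - v + 1)) 2) := by
  induction c generalizing p with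
  | zero =>
      simp only [List.replicate, pvCost_nil, Nat.cast_zero]
      split_ifs with h1 h2
      · rw [(by ring : (p + 1 + (p + 0)) * 0 = 0), pvFd2_zero]; ring
      · rw [(by ring : (p + 1 + (p + 0)) * 0 = 0), pvFd2_zero]; ring
      · omega
  | succ c ih =>
      rw [List.replicate_succ, pvCost_cons, ih (p + 1)]
      push_cast
      by_cases h1 : v ≤ p + 1
      · have ha : |v - (p + 1)| = (p + 1) - v := by
          rw [abs_of_nonpos (by omega)]; ring
        have hb : v ≤ p + 1 + 1 := by omega
        rw [if_pos h1, if_pos hb, ha]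
        have he : (p + 1 + (p + (c + 1))) * (c + 1) = 2 * (p + 1) + (p + 1 + 1 + (p + 1 + c)) * c := by ring
        rw [he, pvFd2_shift]; ring
      · have ha : |v - (p + 1)| = v - (p + 1) := abs_of_nonneg (by omega)
        rw [if_neg h1, ha]
        by_cases hb : v ≤ p + 1 + 1
        · -- v = p + 2 : the inner run starts exactly at v
          have hv : v = p + 2 := by omega
          rw [if_pos hb]
          subst hv
          by_cases h2 : p + ((c : Int) + 1) ≤ p + 2
          · -- run of length ≤ 1 after the head
            have hc : c ≤ 1 := by omega
            rw [if_pos h2]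
            interval_cases c <;>
              simp only [Nat.cast_zero, Nat.cast_one] <;>
              rw [PySem.Int.floordiv_eq_ediv_of_pos (by norm_num),
                  PySem.Int.floordiv_eq_ediv_of_pos (by norm_num)] <;>
              ring_nf <;> omega
          · rw [if_neg h2]
            have he : (p + 1 + 1 + (p + 1 + c)) * c = 2 * (c * (p + 2)) + ((c : Int) - 1) * c := by ring
            rw [he, pvFd2_shift]
            have h4 : (p + 2 - (p + 1)) * (p + 2 - (p + 1) + 1) = 2 * 1 + 0 := by ring
            have h5 : (p + ((c : Int) + 1) - (p + 2)) * (p + ((c : Int) + 1) - (p + 2) + 1) = ((c : Int) - 1) * c := by ring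
            rw [h4, h5, pvFd2_shift, pvFd2_zero]
            ring
        · by_cases h2 : p + 1 + (c : Int) ≤ v
          · have h2' : p + ((c : Int) + 1) ≤ v := by omega
            rw [if_pos h2', if_neg hb, if_pos h2]
            have he : (p + 1 + (p + ((c : Int) + 1))) * ((c : Int) + 1) = 2 * (p + 1) + (p + 1 + 1 + (p + 1 + c)) * c := by ring
            rw [he, pvFd2_shift]; ring
          · have h2' : ¬ p + ((c : Int) + 1) ≤ v := by omega
            rw [if_neg h2', if_neg hb, if_neg h2]
            have h6 : PySem.Int.floordiv ((v - (p + 1)) * (v - (p + 1) + 1)) 2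
                = (v - (p + 1)) + PySem.Int.floordiv ((v - (p + 1) - 1) * (v - (p + 1))) 2 :=
              pvTri_rec (v - (p + 1))
            rw [h6]
            have h7 : (v - (p + 1 + 1)) * (v - (p + 1 + 1) + 1) = (v - (p + 1) - 1) * (v - (p + 1)) := by ring
            have h8 : (p + 1 + (c : Int) - v) * (p + 1 + c - v + 1) = (p + ((c : Int) + 1) - v) * (p + (c + 1) - v + 1) := by ring
            rw [h7, h8]
            ring

-- count of x in a flatMap of runs over nodup keys
theorem pvCount_flatMap (ks : List Int) (f : Int → Nat) (hnd : ks.Nodup) (x : Int) :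
    (ks.flatMap (fun v => List.replicate (f v) v)).count x = if x ∈ ks then f x else 0 := by
  induction ks with
  | nil => simp
  | cons k t ih =>
      rcases List.nodup_cons.mp hnd with ⟨hk, ht⟩
      rw [List.flatMap_cons, List.count_append, ih ht]
      by_cases hx : x = k
      · subst hx; simp [hk]
      · simp [List.count_replicate, hx, List.mem_cons]
        intro h; exact absurd h.symm hx

-- a flatMap of runs over strictly increasing keys is nondecreasing
theorem pvPairwise_flatMap (ks : List Int) (f : Int → Nat) (h : ks.Pairwise (· < ·)) :
    (ks.flatMap (fun v => List.replicate (f v) v)).Pairwise (· ≤ ·) := by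
  induction ks with
  | nil => simp
  | cons k t ih =>
      rcases List.pairwise_cons.mp h with ⟨hk, ht⟩
      rw [List.flatMap_cons, List.pairwise_append]
      refine ⟨List.pairwise_replicate.mpr (by simp), ih ht, ?_⟩
      intro a ha b hb
      rcases List.mem_flatMap.mp hb with ⟨u, hu, hbu⟩
      have := List.eq_of_mem_replicate ha
      have := List.eq_of_mem_replicate hbu
      subst_vars
      exact le_of_lt (hk u hu)

-- B's loop over the sorted distinct values computes the cost of the concatenated runs
theorem pvFold (A : List Int) (ks : List Int) (m p : Int) :
    ks.foldl (pvStep A) (m, p)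
    = (m + pvCost (ks.flatMap (fun v => List.replicate (A.count v) v)) p,
       p + ((ks.map (fun v => (A.count v : Int))).sum)) := by
  induction ks generalizing m p with
  | nil => simp [pvCost_nil]
  | cons k t ih =>
      rw [List.foldl_cons, ih, List.flatMap_cons, pvCost_append, pvBlock (A.count k) k p]
      simp only [pvStep, List.length_replicate, List.map_cons, List.sum_cons, Prod.mk.injEq]
      constructor <;> ring

-- the concatenation of the runs over the sorted distinct values IS sorted(A)
theorem pvRuns_eq_sorted (A : List Int) :
    PySem.List.sorted A (fun x => x) false
      = (PySem.List.sorted (PySem.Set.ofList A) (fun x => x) false).flatMap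
          (fun v => List.replicate (A.count v) v) := by
  have hks : (PySem.List.sorted (PySem.Set.ofList A) (fun x => x) false).Pairwise (· < ·) :=
    PySem.List.sorted_ofList_pairwise_lt A
  have hnd : (PySem.List.sorted (PySem.Set.ofList A) (fun x => x) false).Nodup := hks.nodup
  apply PySem.List.sorted_id_eq_of_perm_of_pairwise
  · rw [List.perm_iff_count]
    intro x
    rw [pvCount_flatMap _ _ hnd x]
    by_cases hx : x ∈ A
    · rw [if_pos]
      rw [PySem.List.mem_sorted]
      exact (PySem.Set.mem_ofList _ _).mpr hx
    · rw [if_neg, List.count_eq_zero_of_not_mem hx]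
      rw [PySem.List.mem_sorted]
      intro h; exact hx ((PySem.Set.mem_ofList _ _).mp h)
  · exact pvPairwise_flatMap _ _ hks

-- A's index loop over the sorted list is the same elementwise cost
theorem pvLoopA (s : List Int) :
    (PySem.List.pyRange 0 (s.length : Int) 1).foldl
      (fun m k => m + |PySem.List.pyGetD s k 0 - (k + 1)|) 0 = pvCost s 0 := by
  rw [PySem.List.foldl_add]
  unfold pvCost
  rw [PySem.List.enumerate_eq_map_pyRange s 0, List.map_map]
  simp [PySem.List.len_eq, Function.comp_def]

-- ===== VERDICT (by name: the statement is the Claim_ definition above) =====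
theorem solution_spec : Claim_equal_solution := by
  intro A _
  simp only [Spec_solution, solution, solution_alt]
  rw [PySem.Dict.foldl_insert_getD_add_one_eq_counter, PySem.Dict.keys_counter, pvStep_eq, pvFold]
  rw [pvLoopA, pvRuns_eq_sorted]
  simp
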